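-- pv_equiv track=rewrite | github.com/laracmv/Academia-Python | revisao/ai/despachandobagagens.py | bagagens
-- ===== SOURCE A (Python) =====
-- def bagagens(lfranquias, ldespachado):
--     lorganizada = []
--     retorno = []
--     i = 0
--     while i < len(franquias):
--         for f in range(len(ldespachado)):
--             if ldespachado[f][0] == i:
--                 lorganizada.append(ldespachado[f])
--         i+=1
--
--     for g in range(len(lorganizada)):
--         pagar = 0
--         mala = 1
--         nmalas = 0
--         while mala < len(lorganizada[g]):
--             if lorganizada[g][mala] > lfranquias[g][1] :
--                 passou = abs(lfranquias[g][1] - lorganizada[g][mala])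
--                 pagar += passou * 50
--             nmalas +=1
--             mala +=1
--
--         if nmalas > lfranquias[g][0]:
--             pagar += 300
--         retorno.append(pagar)
--
--
--     return lorganizada
--
-- franquias = [[1, 10], [0, 23], [2, 32]]
-- ===== SOURCE B (Python) =====
-- franquias = [[1, 10], [0, 23], [2, 32]]
--
-- def bagagens(lfranquias, ldespachado):
--     # One-pass bucket grouping by the entry's first element; the original's
--     # 'retorno' loop is dead code (its result is never returned), so it is dropped.
--     buckets = [[] for _ in franquias]
--     for e in ldespachado:
--         if 0 <= e[0] < len(franquias):
--             buckets[e[0]].append(e)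
--     return [e for b in buckets for e in b]
-- ===== Notes on version B (the rewrite author's own statement) =====
-- stated objective: simpler
-- what changed: B groups entries in a single bucket pass over ldespachado (one bucket per franchise index) instead of A's per-index rescans of the whole list, and drops A's dead 'retorno' loop whose result is never returned.
import Mathlib
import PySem

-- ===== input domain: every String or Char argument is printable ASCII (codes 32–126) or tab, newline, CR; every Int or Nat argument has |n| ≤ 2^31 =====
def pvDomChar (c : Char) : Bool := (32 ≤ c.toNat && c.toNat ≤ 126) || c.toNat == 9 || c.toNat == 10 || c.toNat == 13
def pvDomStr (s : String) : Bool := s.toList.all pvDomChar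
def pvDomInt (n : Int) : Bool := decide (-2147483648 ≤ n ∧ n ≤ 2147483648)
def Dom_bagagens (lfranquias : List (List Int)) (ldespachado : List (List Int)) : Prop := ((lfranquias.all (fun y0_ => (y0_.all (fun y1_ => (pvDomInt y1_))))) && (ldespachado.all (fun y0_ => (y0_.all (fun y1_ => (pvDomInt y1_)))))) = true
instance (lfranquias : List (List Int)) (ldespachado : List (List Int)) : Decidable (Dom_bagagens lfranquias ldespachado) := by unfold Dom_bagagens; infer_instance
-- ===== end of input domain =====

-- B replaces A's per-index rescans of ldespachado with a single bucket pass and drops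
-- A's dead 'retorno' loop (its result is never returned; its only effect is raising).

-- module-level constant 'franquias' used by A's grouping loop
def franquiasG : List (List Int) := [[1, 10], [0, 23], [2, 32]]

-- ===== PORT A =====
def bagagens (lfranquias : List (List Int)) (ldespachado : List (List Int)) : List (List Int) :=
  let lorganizada : List (List Int) :=
    (PySem.List.pyRange 0 (franquiasG.length : Int) 1).foldl (fun acc i =>
      (PySem.List.pyRange 0 (ldespachado.length : Int) 1).foldl (fun acc2 f =>
        if PySem.List.pyGetD (PySem.List.pyGetD ldespachado f []) 0 0 == i
        then acc2 ++ [PySem.List.pyGetD ldespachado f []] else acc2) acc) []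
  -- A's second loop computes 'retorno', which is dead (never returned); ported, unused
  -- (pyGetD defaults stand for indexings that raise only outside Pre_bagagens)
  let _retorno : List Int :=
    (PySem.List.pyRange 0 (lorganizada.length : Int) 1).foldl (fun ret g =>
      let grupo := PySem.List.pyGetD lorganizada g []
      let fr := PySem.List.pyGetD lfranquias g []
      let st := (PySem.List.pyRange 1 (grupo.length : Int) 1).foldl
        (fun (s : Int × Int) mala =>
          let pagar := if PySem.List.pyGetD grupo mala 0 > PySem.List.pyGetD fr 1 0
            then s.1 + |PySem.List.pyGetD fr 1 0 - PySem.List.pyGetD grupo mala 0| * 50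
            else s.1
          (pagar, s.2 + 1)) ((0 : Int), (0 : Int))
      let pagar := if st.2 > PySem.List.pyGetD fr 0 0 then st.1 + 300 else st.1
      ret ++ [pagar]) []
  lorganizada

-- ===== PORT B =====
def bagagens_alt (lfranquias : List (List Int)) (ldespachado : List (List Int)) : List (List Int) :=
  let buckets0 : List (List (List Int)) := franquiasG.map (fun _ => [])
  let buckets := ldespachado.foldl (fun bs e =>
    let h := PySem.List.pyGetD e 0 0
    if 0 ≤ h ∧ h < (franquiasG.length : Int)
    then bs.set h.toNat ((bs.getD h.toNat []) ++ [e])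
    else bs) buckets0
  buckets.flatMap (fun b => b)

-- ===== PRECONDITION & SPEC =====
-- the grouped list A builds (entries with first element 0, then 1, then 2),
-- used only to state where A's dead 'retorno' loop would raise
def pvGrouped (ldespachado : List (List Int)) : List (List Int) :=
  ldespachado.filter (fun e => PySem.List.pyGetD e 0 0 == 0) ++
  ldespachado.filter (fun e => PySem.List.pyGetD e 0 0 == 1) ++
  ldespachado.filter (fun e => PySem.List.pyGetD e 0 0 == 2)

-- Pre_ excludes exactly the inputs on which A raises IndexError: an empty despatched
-- entry (ldespachado[f][0] in the grouping scan), or a g-th grouped entry for which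
-- lfranquias[g] is missing / empty (lfranquias[g][0] in the dead 'retorno' loop) or
-- has a single field while that grouped entry has ≥ 2 fields (lfranquias[g][1]).
def Pre_bagagens (lfranquias : List (List Int)) (ldespachado : List (List Int)) : Prop :=
  (∀ e ∈ ldespachado, e ≠ []) ∧
  (∀ g ∈ List.range (pvGrouped ldespachado).length,
    g < lfranquias.length ∧ 1 ≤ (lfranquias.getD g []).length ∧
    (2 ≤ ((pvGrouped ldespachado).getD g []).length → 2 ≤ (lfranquias.getD g []).length))
instance (lfranquias : List (List Int)) (ldespachado : List (List Int)) : Decidable (Pre_bagagens lfranquias ldespachado) := by unfold Pre_bagagens; infer_instance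

def pvWitness_bagagens : List (List Int) × List (List Int) :=
  ([[2, 10], [1, 20]], [[0, 5], [1, 7, 25]])

def Spec_bagagens (lfranquias : List (List Int)) (ldespachado : List (List Int)) (out : List (List Int)) : Prop := out = bagagens_alt lfranquias ldespachado
instance (lfranquias : List (List Int)) (ldespachado : List (List Int)) (out : List (List Int)) : Decidable (Spec_bagagens lfranquias ldespachado out) := by unfold Spec_bagagens; infer_instance

-- ===== CLAIM (what is proved, stated in full; the proofs are below) =====
def Claim_equal_bagagens : Prop := ∀ (lfranquias : List (List Int)) (ldespachado : List (List Int)), Dom_bagagens lfranquias ldespachado → Pre_bagagens lfranquias ldespachado → Spec_bagagens lfranquias ldespachado (bagagens lfranquias ldespachado)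

-- ===== LEMMAS AND PROOFS =====

-- head key of an entry, as both ports compute it
def pvKey (e : List Int) : Int := PySem.List.pyGetD e 0 0

-- A's grouping equals the concatenation of the three per-index filters
lemma bagagens_eq_filters (lfranquias ldespachado : List (List Int)) :
    bagagens lfranquias ldespachado =
      ldespachado.filter (fun e => pvKey e == 0) ++
      ldespachado.filter (fun e => pvKey e == 1) ++
      ldespachado.filter (fun e => pvKey e == 2) := by
  have hA : bagagens lfranquias ldespachado =
      (PySem.List.pyRange 0 (franquiasG.length : Int) 1).foldl (fun acc i =>
        (PySem.List.pyRange 0 (ldespachado.length : Int) 1).foldl (fun acc2 f =>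
          if PySem.List.pyGetD (PySem.List.pyGetD ldespachado f []) 0 0 == i
          then acc2 ++ [PySem.List.pyGetD ldespachado f []] else acc2) acc) [] := rfl
  rw [hA]
  have hr : PySem.List.pyRange 0 (franquiasG.length : Int) 1 = [0, 1, 2] := by decide
  rw [hr]
  simp only [List.foldl_cons, List.foldl_nil]
  rw [PySem.List.foldl_pyRange_zero_pyGetD' ldespachado []
        (fun acc2 e => if PySem.List.pyGetD e 0 0 == (0:Int) then acc2 ++ [e] else acc2)]
  rw [PySem.List.foldl_append_if_eq_filter]
  rw [PySem.List.foldl_pyRange_zero_pyGetD' ldespachado []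
        (fun acc2 e => if PySem.List.pyGetD e 0 0 == (1:Int) then acc2 ++ [e] else acc2)]
  rw [PySem.List.foldl_append_if_eq_filter]
  rw [PySem.List.foldl_pyRange_zero_pyGetD' ldespachado []
        (fun acc2 e => if PySem.List.pyGetD e 0 0 == (2:Int) then acc2 ++ [e] else acc2)]
  rw [PySem.List.foldl_append_if_eq_filter]
  simp [pvKey]

-- B's bucket fold, fully characterised
lemma bucket_fold (l : List (List Int)) (b0 b1 b2 : List (List Int)) :
    l.foldl (fun bs e =>
        let h := PySem.List.pyGetD e 0 0
        if 0 ≤ h ∧ h < (franquiasG.length : Int)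
        then bs.set h.toNat ((bs.getD h.toNat []) ++ [e])
        else bs) [b0, b1, b2] =
      [b0 ++ l.filter (fun e => pvKey e == 0),
       b1 ++ l.filter (fun e => pvKey e == 1),
       b2 ++ l.filter (fun e => pvKey e == 2)] := by
  induction l generalizing b0 b1 b2 with
  | nil => simp
  | cons e l ih =>
    rw [List.foldl_cons]
    by_cases hc : 0 ≤ PySem.List.pyGetD e 0 0 ∧ PySem.List.pyGetD e 0 0 < (franquiasG.length : Int)
    · have h3 : (franquiasG.length : Int) = 3 := by decide
      have hb : 0 ≤ PySem.List.pyGetD e 0 0 ∧ PySem.List.pyGetD e 0 0 < 3 := by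
        rw [h3] at hc; exact hc
      have hk : PySem.List.pyGetD e 0 0 = 0 ∨ PySem.List.pyGetD e 0 0 = 1 ∨
          PySem.List.pyGetD e 0 0 = 2 := by omega
      rcases hk with h | h | h
      · have hs : (let h := PySem.List.pyGetD e 0 0
            if 0 ≤ h ∧ h < (franquiasG.length : Int)
            then [b0, b1, b2].set h.toNat (([b0, b1, b2].getD h.toNat []) ++ [e])
            else [b0, b1, b2]) = [b0 ++ [e], b1, b2] := by
          simp [h, franquiasG]
        rw [hs, ih]
        simp [pvKey, h]
      · have hs : (let h := PySem.List.pyGetD e 0 0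
            if 0 ≤ h ∧ h < (franquiasG.length : Int)
            then [b0, b1, b2].set h.toNat (([b0, b1, b2].getD h.toNat []) ++ [e])
            else [b0, b1, b2]) = [b0, b1 ++ [e], b2] := by
          simp [h, franquiasG]
        rw [hs, ih]
        simp [pvKey, h]
      · have hs : (let h := PySem.List.pyGetD e 0 0
            if 0 ≤ h ∧ h < (franquiasG.length : Int)
            then [b0, b1, b2].set h.toNat (([b0, b1, b2].getD h.toNat []) ++ [e])
            else [b0, b1, b2]) = [b0, b1, b2 ++ [e]] := by
          simp [h, franquiasG]
        rw [hs, ih]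
        simp [pvKey, h]
    · have h3 : (franquiasG.length : Int) = 3 := by decide
      have hb : ¬ (0 ≤ PySem.List.pyGetD e 0 0 ∧ PySem.List.pyGetD e 0 0 < 3) := by
        rw [h3] at hc; exact hc
      have h0 : PySem.List.pyGetD e 0 0 ≠ 0 := by omega
      have h1 : PySem.List.pyGetD e 0 0 ≠ 1 := by omega
      have h2 : PySem.List.pyGetD e 0 0 ≠ 2 := by omega
      have hs : (let h := PySem.List.pyGetD e 0 0
          if 0 ≤ h ∧ h < (franquiasG.length : Int)
          then [b0, b1, b2].set h.toNat (([b0, b1, b2].getD h.toNat []) ++ [e])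
          else [b0, b1, b2]) = [b0, b1, b2] := by
        simp [hc]
      rw [hs, ih]
      simp [pvKey, h0, h1, h2]

lemma bagagens_alt_eq_filters (lfranquias ldespachado : List (List Int)) :
    bagagens_alt lfranquias ldespachado =
      ldespachado.filter (fun e => pvKey e == 0) ++
      ldespachado.filter (fun e => pvKey e == 1) ++
      ldespachado.filter (fun e => pvKey e == 2) := by
  have hB : bagagens_alt lfranquias ldespachado =
      (ldespachado.foldl (fun bs e =>
        let h := PySem.List.pyGetD e 0 0
        if 0 ≤ h ∧ h < (franquiasG.length : Int)
        then bs.set h.toNat ((bs.getD h.toNat []) ++ [e])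
        else bs) [([] : List (List Int)), [], []]).flatMap (fun b => b) := rfl
  rw [hB, bucket_fold]
  simp

-- ===== VERDICT (by name: the statement is the Claim_ definition above) =====
theorem bagagens_spec : Claim_equal_bagagens := by
  intro lfranquias ldespachado _ _
  unfold Spec_bagagens
  rw [bagagens_eq_filters, bagagens_alt_eq_filters]
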